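-- pv_equiv track=rewrite | github.com/Wisien999/matura-informatyka | zbiór inf/Coding/78/78-3.py | skrot
-- ===== SOURCE A (Python) =====
-- def skrot(message):
--     S = list(map(ord, "ALGORYTM"))
--     if message[-1] == "\n":
--         message = message[:-1]
--     to_fill = 8 - (len(message) % 8)
--     message = message + ("." * to_fill)
--     for start in range(0, len(message), 8):
--         for j in range(8):
--             S[j] = (S[j] + ord(message[start+j])) % 128
--     result = ""
--     for j in range(8):
--         result += chr(65 + S[j] % 26)
--     return result
-- ===== SOURCE B (Python) =====
-- def skrot(message):
--     if message.endswith("\n"):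
--         message = message[:-1]
--     message += "." * (8 - len(message) % 8)
--     return "".join(
--         chr(65 + (ord("ALGORYTM"[j]) + sum(map(ord, message[j::8]))) % 128 % 26)
--         for j in range(8)
--     )
-- ===== Notes on version B (the rewrite author's own statement) =====
-- stated objective: faster
-- what changed: Replaces the chunk-by-chunk double Python loop that keeps an 8-slot running state reduced mod 128 at every step with a column-wise pass: for each of the 8 positions it sums ord over the strided slice message[j::8] in one sum(map(ord, ...)) call and applies % 128 once, building the result with a join.
-- outside the precondition, e.g. on skrot(''): A raises IndexError, B returns 'HSNVAHCT'
import Mathlib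
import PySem

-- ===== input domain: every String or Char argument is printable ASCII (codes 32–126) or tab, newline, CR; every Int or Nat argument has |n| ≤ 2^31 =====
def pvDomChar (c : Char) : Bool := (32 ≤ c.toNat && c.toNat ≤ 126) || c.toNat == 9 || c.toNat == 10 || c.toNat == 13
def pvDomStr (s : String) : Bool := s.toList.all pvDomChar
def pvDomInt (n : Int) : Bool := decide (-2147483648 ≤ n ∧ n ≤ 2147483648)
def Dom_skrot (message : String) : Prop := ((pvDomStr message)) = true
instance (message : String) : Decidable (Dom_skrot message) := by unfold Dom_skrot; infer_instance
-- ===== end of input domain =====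

-- B sums each of the 8 columns over the strided slice message[j::8] and reduces mod 128 once,
-- instead of A's chunk-by-chunk double loop over an 8-slot running state (idiomatic; same return value).

def pvOrd (c : Char) : Int := (c.toNat : Int)

-- ===== PORT A =====
-- inner loop `for j in range(8): S[j] = (S[j] + ord(message[start+j])) % 128`
-- (the index start+j is always in range after padding, so pyGetD's default is never used)
def pvStepA (m : List Char) (S : List Int) (start : Int) : List Int :=
  (List.range 8).foldl
    (fun S j => S.set j (PySem.Int.mod (S.getD j 0 + pvOrd (PySem.List.pyGetD m (start + (j : Int)) '.')) 128)) S

def skrot (message : String) : String :=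
  let m0 := message.toList
  let m1 := if PySem.List.pyGet? m0 (-1) = some '\n' then PySem.List.slice m0 none (some (-1)) else m0
  let m := m1 ++ List.replicate (8 - m1.length % 8) '.'
  let S0 : List Int := "ALGORYTM".toList.map pvOrd
  let S := (PySem.List.pyRange 0 (m.length : Int) 8).foldl (fun S start => pvStepA m S start) S0
  String.ofList ((List.range 8).foldl
    (fun r j => r ++ [Char.ofNat (65 + PySem.Int.mod (S.getD j 0) 26).toNat]) [])

-- ===== PORT B =====
-- the strided slice m[j::8], after the initial `drop j`: every 8th element
def pvEvery8 : List Char → List Char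
  | [] => []
  | c :: rest => c :: pvEvery8 (rest.drop 7)
termination_by m => m.length
decreasing_by simp

-- sum(map(ord, m[j::8]))
def pvColSum (m : List Char) (j : Nat) : Int := ((pvEvery8 (m.drop j)).map pvOrd).sum

def skrot_alt (message : String) : String :=
  let m0 := message.toList
  let m1 := if m0.getLast? = some '\n' then m0.dropLast else m0
  let m := m1 ++ List.replicate (8 - m1.length % 8) '.'
  String.ofList ((List.range 8).map (fun j =>
    Char.ofNat (65 + (PySem.Int.mod (PySem.Int.mod (pvOrd ("ALGORYTM".toList.getD j 'A') + pvColSum m j) 128) 26)).toNat))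

-- ===== PRECONDITION & SPEC =====
-- Pre_ excludes only the empty string, on which A's `message[-1]` raises IndexError.
def Pre_skrot (message : String) : Prop := message ≠ ""
instance (message : String) : Decidable (Pre_skrot message) := by unfold Pre_skrot; infer_instance
def pvWitness_skrot : String := "Ala\n"

def Spec_skrot (message : String) (out : String) : Prop := out = skrot_alt message
instance (message : String) (out : String) : Decidable (Spec_skrot message out) := by unfold Spec_skrot; infer_instance

-- ===== CLAIM (what is proved, stated in full; the proofs are below) =====
def Claim_equal_skrot : Prop := ∀ (message : String), Dom_skrot message → Pre_skrot message → Spec_skrot message (skrot message)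

-- ===== LEMMAS AND PROOFS =====

lemma pvMod_eq (x b : Int) (hb : 0 ≤ b) : PySem.Int.mod x b = x % b := by
  simp [PySem.Int.mod, Int.fmod_eq_emod, hb]

lemma pvEvery8_nil : pvEvery8 [] = [] := by simp [pvEvery8]

lemma pvEvery8_cons (c : Char) (rest : List Char) :
    pvEvery8 (c :: rest) = c :: pvEvery8 (rest.drop 7) := by
  simp [pvEvery8]

-- A's inner loop updates each of the 8 slots once, reading only the slot it writes
lemma pvStepA_getD (m : List Char) (S : List Int) (hS : S.length = 8) (start : Int) (j : Nat) (hj : j < 8) :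
    (pvStepA m S start).getD j 0
      = PySem.Int.mod (S.getD j 0 + pvOrd (PySem.List.pyGetD m (start + (j : Int)) '.')) 128 := by
  rcases S with _|⟨a,_|⟨b,_|⟨c,_|⟨d,_|⟨e,_|⟨f,_|⟨g,_|⟨h,_|⟨i,t⟩⟩⟩⟩⟩⟩⟩⟩⟩ <;> simp at hS
  interval_cases j <;> simp [pvStepA, List.range_succ]

lemma pvStepA_len (m : List Char) (S : List Int) (hS : S.length = 8) (start : Int) :
    (pvStepA m S start).length = 8 := by
  rcases S with _|⟨a,_|⟨b,_|⟨c,_|⟨d,_|⟨e,_|⟨f,_|⟨g,_|⟨h,_|⟨i,t⟩⟩⟩⟩⟩⟩⟩⟩⟩ <;> simp at hS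
  simp [pvStepA, List.range_succ]

lemma pvColSum_ge (m : List Char) (i : Nat) (h : m.length ≤ i) : pvColSum m i = 0 := by
  simp [pvColSum, List.drop_eq_nil_of_le h, pvEvery8_nil]

-- peeling one element off a column
lemma pvColSum_lt (m : List Char) (i : Nat) (h : i < m.length) :
    pvColSum m i = pvOrd (m.getD i '.') + pvColSum m (i + 8) := by
  unfold pvColSum
  rw [List.drop_eq_getElem_cons h, pvEvery8_cons, List.drop_drop]
  rw [List.getD_eq_getElem m '.' h]
  simp

-- invariant of A's outer loop: slot j holds (initial + column sum so far) mod 128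
lemma pvFoldA (m : List Char) (j : Nat) (hj : j < 8) : ∀ (k a : Nat) (S : List Int),
    S.length = 8 → a + 8 * k = m.length →
    (∀ j' : Nat, j' < 8 → 0 ≤ S.getD j' 0 ∧ S.getD j' 0 < 128) →
    ((List.range k).foldl (fun (S : List Int) (i : Nat) => pvStepA m S ((a : Int) + 8 * (i : Int))) S).getD j 0
      = PySem.Int.mod (S.getD j 0 + pvColSum m (a + j)) 128 := by
  intro k
  induction k with
  | zero =>
    intro a S hS hlen hb
    simp only [List.range_zero, List.foldl_nil]
    rw [pvColSum_ge m (a + j) (by omega), pvMod_eq _ _ (by norm_num)]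
    have := hb j hj
    omega
  | succ k ih =>
    intro a S hS hlen hb
    rw [List.range_succ_eq_map, List.foldl_cons, List.foldl_map]
    have hfun : (fun (S : List Int) (i : Nat) => pvStepA m S ((a : Int) + 8 * ((Nat.succ i : Nat) : Int)))
        = (fun (S : List Int) (i : Nat) => pvStepA m S (((a + 8 : Nat) : Int) + 8 * (i : Int))) := by
      funext S i
      congr 1
      push_cast
      ring
    rw [hfun]
    have hS' := pvStepA_len m S hS ((a : Int) + 8 * ((0:Nat) : Int))
    have hb' : ∀ j' : Nat, j' < 8 → 0 ≤ (pvStepA m S ((a : Int) + 8 * ((0:Nat) : Int))).getD j' 0 ∧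
        (pvStepA m S ((a : Int) + 8 * ((0:Nat) : Int))).getD j' 0 < 128 := by
      intro j' hj'
      rw [pvStepA_getD m S hS _ j' hj', pvMod_eq _ _ (by norm_num)]
      constructor
      · exact Int.emod_nonneg _ (by norm_num)
      · exact Int.emod_lt_of_pos _ (by norm_num)
    rw [ih (a + 8) _ hS' (by omega) hb']
    rw [pvStepA_getD m S hS _ j hj]
    have hidx : ((a : Int) + 8 * ((0:Nat) : Int) + (j : Int)) = ((a + j : Nat) : Int) := by push_cast; ring
    rw [hidx]
    have hlt : a + j < m.length := by omega
    rw [PySem.List.pyGetD_of_nonneg m '.' (by positivity), pvColSum_lt m (a + j) hlt]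
    have : (a + j : Nat) + 8 = a + 8 + j := by omega
    rw [this]
    have h1 : (((a + j : Nat) : Int)).toNat = a + j := by omega
    rw [h1]
    simp only [pvMod_eq _ (128 : Int) (by norm_num)]
    omega

-- ===== VERDICT =====
theorem skrot_spec : Claim_equal_skrot := by
  intro message _ _
  unfold Spec_skrot skrot skrot_alt
  simp only [PySem.List.pyGet?_neg_one, PySem.List.slice_to_neg_one]
  set m1 := (if (message.toList).getLast? = some '\n' then (message.toList).dropLast else message.toList) with hm1
  set m := m1 ++ List.replicate (8 - m1.length % 8) '.' with hm
  have hlen : m.length = m1.length + (8 - m1.length % 8) := by simp [hm]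
  set K := m1.length / 8 + 1 with hK
  have h8K : m.length = 8 * K := by omega
  have hS0 : "ALGORYTM".toList.map pvOrd = [(65:Int),76,71,79,82,89,84,77] := by decide
  rw [hS0]
  rw [PySem.List.pyRange_of_pos 0 (m.length : Int) (by norm_num)]
  have hcount : (if (0:Int) < ((m.length : Int)) then (((m.length : Int) - 0 + 8 - 1) / 8).toNat else 0) = K := by
    rw [if_pos (by omega)]
    omega
  rw [hcount, List.foldl_map]
  have hfun0 : (fun (S : List Int) (k : Nat) => pvStepA m S (0 + 8 * (k : Int)))
      = (fun (S : List Int) (i : Nat) => pvStepA m S (((0:Nat) : Int) + 8 * (i : Int))) := by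
    funext S i
    norm_num
  rw [hfun0]
  have hchar : ∀ j : Nat, j < 8 →
      ((List.range K).foldl (fun (S : List Int) (i : Nat) => pvStepA m S (((0:Nat) : Int) + 8 * (i : Int)))
        [(65:Int),76,71,79,82,89,84,77]).getD j 0
      = PySem.Int.mod (([(65:Int),76,71,79,82,89,84,77].getD j 0) + pvColSum m j) 128 := by
    intro j hj
    rw [pvFoldA m j hj K 0 _ (by rfl) (by omega) (by decide)]
    norm_num
  rw [show List.range 8 = [0,1,2,3,4,5,6,7] from rfl]
  simp only [List.foldl_cons, List.foldl_nil, List.map_cons, List.map_nil, List.nil_append, List.cons_append]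
  rw [hchar 0 (by norm_num), hchar 1 (by norm_num), hchar 2 (by norm_num), hchar 3 (by norm_num),
      hchar 4 (by norm_num), hchar 5 (by norm_num), hchar 6 (by norm_num), hchar 7 (by norm_num)]
  rw [show "ALGORYTM".toList = ['A','L','G','O','R','Y','T','M'] from by decide]
  simp only [pvMod_eq _ (128 : Int) (by norm_num), pvMod_eq _ (26 : Int) (by norm_num)]
  norm_num [pvOrd, show 'A'.toNat = 65 from rfl, show 'L'.toNat = 76 from rfl,
    show 'G'.toNat = 71 from rfl, show 'O'.toNat = 79 from rfl, show 'R'.toNat = 82 from rfl,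
    show 'Y'.toNat = 89 from rfl, show 'T'.toNat = 84 from rfl, show 'M'.toNat = 77 from rfl]
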